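-- pv_equiv track=rewrite | github.com/KGerhardt/TEBinSorter | src/cross_family.py | find_missing_families
-- ===== SOURCE A (Python) =====
-- from collections import defaultdict
--
-- def _get_family(model_name):
--     if ":" in model_name:
--         return model_name.split(":")[1].split("-")[-1]
--     return model_name.split("_")[0]
--
-- def find_missing_families(classifications, hmms_dict):
--     """Identify which families each classified frame is missing.
--
--     Args:
--         classifications: list of classification dicts from facet_classify
--         hmms_dict: {model_name: HMM} for all models
--
--     Returns:
--         missing: dict of {frame_name: set(family_names)} that need searching
--         all_families: set of all known family names
--     """
--     # All families in the database
--     all_families = set(_get_family(name) for name in hmms_dict)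
--
--     # Which families did each frame find?
--     frame_found = defaultdict(set)
--     classified_frames = set()
--     for c in classifications:
--         if c.get("is_secondary"):
--             continue
--         frame_found[c["frame"]].add(c["family"])
--         classified_frames.add(c["frame"])
--
--     # Missing = all_families - found for each classified frame
--     missing = {}
--     for frame in classified_frames:
--         missed = all_families - frame_found[frame]
--         if missed:
--             missing[frame] = missed
--
--     return missing, all_families
-- ===== SOURCE B (Python) =====
-- def _get_family(model_name):
--     if ":" in model_name:
--         return model_name.split(":")[1].split("-")[-1]
--     return model_name.split("_")[0]
--
-- def find_missing_families(classifications, hmms_dict):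
--     """Single pass: maintain the complement (missing families) per frame directly."""
--     all_families = set(_get_family(name) for name in hmms_dict)
--
--     missing = {}
--     for c in classifications:
--         if c.get("is_secondary"):
--             continue
--         frame = c["frame"]
--         if frame not in missing:
--             missing[frame] = set(all_families)
--         missing[frame].discard(c["family"])
--
--     missing = {frame: fams for frame, fams in missing.items() if fams}
--     return missing, all_families
-- ===== Notes on version B (the rewrite author's own statement) =====
-- stated objective: simpler
-- what changed: Replaces A's three passes (group found-families per frame, collect classified frames, then subtract from all_families per frame) by one pass that maintains the complement directly: each frame starts with a copy of all_families and the classified family is discarded as it is seen; a final comprehension drops frames whose set emptied.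
import Mathlib
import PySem

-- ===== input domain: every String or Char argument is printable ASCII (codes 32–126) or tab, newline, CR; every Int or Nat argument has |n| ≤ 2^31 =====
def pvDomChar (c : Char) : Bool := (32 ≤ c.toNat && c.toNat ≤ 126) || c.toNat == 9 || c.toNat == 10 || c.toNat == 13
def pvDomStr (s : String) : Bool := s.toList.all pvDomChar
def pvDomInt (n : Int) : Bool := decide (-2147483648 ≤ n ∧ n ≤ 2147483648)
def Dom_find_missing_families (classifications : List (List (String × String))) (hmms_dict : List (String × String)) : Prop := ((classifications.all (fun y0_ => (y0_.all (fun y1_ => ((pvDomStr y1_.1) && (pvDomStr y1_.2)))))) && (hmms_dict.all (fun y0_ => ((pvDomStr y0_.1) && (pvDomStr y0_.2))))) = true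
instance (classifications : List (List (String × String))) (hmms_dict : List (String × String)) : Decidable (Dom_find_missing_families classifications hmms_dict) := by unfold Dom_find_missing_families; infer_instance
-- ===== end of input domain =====

-- B replaces A's three passes (group found families per frame, collect classified frames,
-- then subtract from all_families per frame) by ONE pass over the classifications that
-- maintains the complement (the still-missing families) per frame directly; objective: simpler.

-- ===== PORT A =====
-- shared helper: _get_family (used verbatim by both Pythons)
def pvGetFamily (model_name : String) : String :=
  if PySem.Str.isIn ":" model_name then
    (PySem.List.pyGet? ((PySem.Str.split? ((PySem.List.pyGet? ((PySem.Str.split? model_name ":").getD []) 1).getD "") "-").getD []) (-1)).getD ""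
  else
    (PySem.List.pyGet? ((PySem.Str.split? model_name "_").getD []) 0).getD ""

-- truthiness of c.get("is_secondary"): the key is present with a nonempty string value
def pvTruthy (o : Option String) : Bool := o.getD "" != ""

-- body of A's loop 'for c in classifications' (frame_found is a defaultdict(set))
def pvStepA (st : PySem.Dict String (PySem.Set String) × PySem.Set String) (c : List (String × String)) : PySem.Dict String (PySem.Set String) × PySem.Set String :=
  let d := PySem.Dict.mk c
  if pvTruthy (d.get? "is_secondary") then st
  else
    let frame := (d.get? "frame").getD ""
    let family := (d.get? "family").getD ""
    (st.1.modify frame PySem.Set.empty (fun s => PySem.Set.add s family),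
     PySem.Set.add st.2 frame)

-- body of A's loop 'for frame in classified_frames'
def pvStepA2 (all : PySem.Set String) (ff : PySem.Dict String (PySem.Set String)) (m : PySem.Dict String (List String)) (frame : String) : PySem.Dict String (List String) :=
  let missed := PySem.Set.diff all (ff.getD frame PySem.Set.empty)
  if !missed.isEmpty then m.insert frame missed else m

def find_missing_families (classifications : List (List (String × String))) (hmms_dict : List (String × String)) : (List (String × List String)) × List String :=
  let all_families : PySem.Set String :=
    PySem.Set.ofList ((hmms_dict.map Prod.fst).map pvGetFamily)
  let st := classifications.foldl pvStepA (PySem.Dict.empty, PySem.Set.empty)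
  let missing := st.2.foldl (pvStepA2 all_families st.1) PySem.Dict.empty
  (missing.items, all_families)

-- ===== PORT B =====
-- body of B's single loop: missing[frame] starts as a copy of all_families; discard the family
def pvStepB (all : PySem.Set String) (m : PySem.Dict String (PySem.Set String)) (c : List (String × String)) : PySem.Dict String (PySem.Set String) :=
  let d := PySem.Dict.mk c
  if pvTruthy (d.get? "is_secondary") then m
  else
    let frame := (d.get? "frame").getD ""
    let m := if m.contains frame then m else m.insert frame all
    m.modify frame PySem.Set.empty (fun s => PySem.Set.discard s ((d.get? "family").getD ""))

def find_missing_families_alt (classifications : List (List (String × String))) (hmms_dict : List (String × String)) : (List (String × List String)) × List String :=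
  let all_families : PySem.Set String :=
    PySem.Set.ofList ((hmms_dict.map Prod.fst).map pvGetFamily)
  let missing := classifications.foldl (pvStepB all_families) PySem.Dict.empty
  -- {frame: fams for frame, fams in missing.items() if fams}
  (missing.items.filter (fun p => !p.2.isEmpty), all_families)

-- ===== PRECONDITION & SPEC =====
-- Pre_ excludes exactly the inputs on which the Python A raises KeyError: a non-secondary
-- classification dict lacking the key "frame" or the key "family".
def Pre_find_missing_families (classifications : List (List (String × String))) (hmms_dict : List (String × String)) : Prop :=
  ∀ c ∈ classifications,
    pvTruthy ((PySem.Dict.mk c).get? "is_secondary") = true ∨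
    ((PySem.Dict.mk c).contains "frame" = true ∧ (PySem.Dict.mk c).contains "family" = true)
instance (classifications : List (List (String × String))) (hmms_dict : List (String × String)) : Decidable (Pre_find_missing_families classifications hmms_dict) := by unfold Pre_find_missing_families; infer_instance

def pvWitness_find_missing_families : (List (List (String × String))) × (List (String × String)) :=
  ([[("frame", "f1"), ("family", "a")], [("is_secondary", "yes")], [("frame", "f2"), ("family", "b")]],
   [("m:x-a", "h1"), ("n_b", "h2"), ("q_c", "h3")])

def Spec_find_missing_families (classifications : List (List (String × String))) (hmms_dict : List (String × String)) (out : (List (String × List String)) × List String) : Prop := out = find_missing_families_alt classifications hmms_dict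
instance (classifications : List (List (String × String))) (hmms_dict : List (String × String)) (out : (List (String × List String)) × List String) : Decidable (Spec_find_missing_families classifications hmms_dict out) := by unfold Spec_find_missing_families; infer_instance

-- ===== CLAIM (what is proved, stated in full; the proofs are below) =====
def Claim_equal_find_missing_families : Prop := ∀ (classifications : List (List (String × String))) (hmms_dict : List (String × String)), Dom_find_missing_families classifications hmms_dict → Pre_find_missing_families classifications hmms_dict → Spec_find_missing_families classifications hmms_dict (find_missing_families classifications hmms_dict)

-- ===== LEMMAS AND PROOFS =====

lemma set_contains_add (t : PySem.Set String) (a x : String) :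
    PySem.Set.contains (PySem.Set.add t a) x = (PySem.Set.contains t x || x == a) := by
  simp only [PySem.Set.add, PySem.Set.contains, List.contains_eq_mem]
  split_ifs with h <;> by_cases hx : x = a <;> simp_all

lemma set_diff_add (s t : PySem.Set String) (a : String) :
    PySem.Set.diff s (PySem.Set.add t a) = PySem.Set.discard (PySem.Set.diff s t) a := by
  simp only [PySem.Set.diff, PySem.Set.discard, List.filter_filter]
  apply List.filter_congr
  intro x _
  rw [set_contains_add]
  cases PySem.Set.contains t x <;> cases (x == a) <;> rfl

lemma set_diff_empty (s : PySem.Set String) : PySem.Set.diff s PySem.Set.empty = s := by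
  simp [PySem.Set.diff, PySem.Set.empty, PySem.Set.contains]

lemma set_add_of_mem (cs : PySem.Set String) (x : String) (h : x ∈ cs) :
    PySem.Set.add cs x = cs := by
  simp [PySem.Set.add, PySem.Set.contains, List.contains_eq_mem, h]

lemma set_add_of_not_mem (cs : PySem.Set String) (x : String) (h : x ∉ cs) :
    PySem.Set.add cs x = cs ++ [x] := by
  simp [PySem.Set.add, PySem.Set.contains, List.contains_eq_mem, h]

-- one non-secondary classification re-establishes the loop invariant
lemma step_inv (all : PySem.Set String) (ff : PySem.Dict String (PySem.Set String))
    (cs : PySem.Set String) (m : PySem.Dict String (PySem.Set String)) (frame family : String)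
    (hkeys : ff.keys = cs) (hnd : cs.Nodup)
    (hm : m.items = cs.map (fun f => (f, PySem.Set.diff all (ff.getD f PySem.Set.empty)))) :
    (ff.modify frame PySem.Set.empty (fun s => PySem.Set.add s family)).keys = PySem.Set.add cs frame ∧
    (PySem.Set.add cs frame).Nodup ∧
    ((if m.contains frame then m else m.insert frame all).modify frame PySem.Set.empty
        (fun s => PySem.Set.discard s family)).items
      = (PySem.Set.add cs frame).map
          (fun f => (f, PySem.Set.diff all
            ((ff.modify frame PySem.Set.empty (fun s => PySem.Set.add s family)).getD f PySem.Set.empty))) := by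
  have hmkeys : m.keys = cs := by
    simp only [PySem.Dict.keys, hm, List.map_map]
    have hid : ((fun (x : String × PySem.Set String) => x.1) ∘
        fun f => (f, PySem.Set.diff all (ff.getD f PySem.Set.empty))) = id := rfl
    rw [hid, List.map_id]
  have hmnd : m.keys.Nodup := hmkeys ▸ hnd
  by_cases hc : frame ∈ cs
  · have hcont : m.contains frame = true := by
      rw [PySem.Dict.contains_eq_decide_mem_keys, hmkeys]; simpa
    have hffcont : ff.contains frame = true := by
      rw [PySem.Dict.contains_eq_decide_mem_keys, hkeys]; simpa
    rw [set_add_of_mem cs frame hc, if_pos hcont]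
    refine ⟨?_, hnd, ?_⟩
    · rw [PySem.Dict.keys_modify, PySem.Dict.keys_insert_of_contains _ _ hffcont, hkeys]
    · have hgd : m.getD frame PySem.Set.empty = PySem.Set.diff all (ff.getD frame PySem.Set.empty) := by
        apply PySem.Dict.getD_of_mem_items _ _ hmnd
        rw [hm]
        exact List.mem_map.mpr ⟨frame, hc, rfl⟩
      simp only [PySem.Dict.modify]
      rw [PySem.Dict.items_insert_of_contains _ _ hcont, hm, List.map_map]
      apply List.map_congr_left
      intro f hf
      by_cases hfe : f = frame
      · subst hfe
        simp only [Function.comp, beq_self_eq_true, if_pos]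
        rw [hgd, PySem.Dict.getD_insert_self, set_diff_add]
      · have hbe : (f == frame) = false := beq_false_of_ne hfe
        simp only [Function.comp, hbe, Bool.false_eq_true, if_neg, not_false_iff]
        rw [PySem.Dict.getD_insert_of_ne _ _ _ hfe]
  · have hcont : m.contains frame = false := by
      rw [PySem.Dict.contains_eq_decide_mem_keys, hmkeys]; simpa
    have hffcont : ff.contains frame = false := by
      rw [PySem.Dict.contains_eq_decide_mem_keys, hkeys]; simpa
    rw [set_add_of_not_mem cs frame hc, if_neg (by simp [hcont])]
    refine ⟨?_, ?_, ?_⟩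
    · rw [PySem.Dict.keys_modify, PySem.Dict.keys_insert_of_not_contains _ _ hffcont, hkeys]
    · simp only [List.nodup_append, List.nodup_singleton, true_and]
      exact ⟨hnd, by simpa using fun a ha (h : a = frame) => hc (h ▸ ha)⟩
    · have hins : (m.insert frame all).items = m.items ++ [(frame, all)] :=
        PySem.Dict.items_insert_of_not_contains _ _ hcont
      have hcont' : (m.insert frame all).contains frame = true := PySem.Dict.contains_insert_self _ _ _
      have hgd : (m.insert frame all).getD frame PySem.Set.empty = all :=
        PySem.Dict.getD_insert_self _ _ _ _
      simp only [PySem.Dict.modify]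
      rw [hgd, PySem.Dict.items_insert_of_contains _ _ hcont', hins, List.map_append, hm, List.map_map,
          List.map_append]
      congr 1
      · apply List.map_congr_left
        intro f hf
        have hfe : f ≠ frame := fun h => hc (h ▸ hf)
        have hbe : (f == frame) = false := beq_false_of_ne hfe
        simp only [Function.comp, hbe, Bool.false_eq_true, if_neg, not_false_iff]
        rw [PySem.Dict.getD_insert_of_ne _ _ _ hfe]
      · simp only [List.map_cons, List.map_nil, beq_self_eq_true, if_pos]
        rw [PySem.Dict.getD_insert_self]
        rw [PySem.Dict.getD_of_not_contains _ _ hffcont, set_diff_add, set_diff_empty]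

-- invariant of the classification loop: B's dict holds, per classified frame (in first-seen
-- order), exactly all \ found, where (found, classified) is A's state
lemma loop_inv (all : PySem.Set String) (l : List (List (String × String)))
    (ff : PySem.Dict String (PySem.Set String)) (cs : PySem.Set String)
    (m : PySem.Dict String (PySem.Set String))
    (hkeys : ff.keys = cs) (hnd : cs.Nodup)
    (hm : m.items = cs.map (fun f => (f, PySem.Set.diff all (ff.getD f PySem.Set.empty)))) :
    (l.foldl pvStepA (ff, cs)).1.keys = (l.foldl pvStepA (ff, cs)).2 ∧
    (l.foldl pvStepA (ff, cs)).2.Nodup ∧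
    (l.foldl (pvStepB all) m).items
      = (l.foldl pvStepA (ff, cs)).2.map
          (fun f => (f, PySem.Set.diff all ((l.foldl pvStepA (ff, cs)).1.getD f PySem.Set.empty))) := by
  induction l generalizing ff cs m with
  | nil => exact ⟨hkeys, hnd, hm⟩
  | cons c t ih =>
    simp only [List.foldl_cons]
    by_cases hsec : pvTruthy ((PySem.Dict.mk c).get? "is_secondary") = true
    · rw [show pvStepA (ff, cs) c = (ff, cs) from by simp [pvStepA, hsec],
         show pvStepB all m c = m from by simp [pvStepB, hsec]]
      exact ih ff cs m hkeys hnd hm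
    · rw [show pvStepA (ff, cs) c
          = (ff.modify (((PySem.Dict.mk c).get? "frame").getD "") PySem.Set.empty
               (fun s => PySem.Set.add s (((PySem.Dict.mk c).get? "family").getD "")),
             PySem.Set.add cs (((PySem.Dict.mk c).get? "frame").getD "")) from by simp [pvStepA, hsec],
         show pvStepB all m c
          = (if m.contains (((PySem.Dict.mk c).get? "frame").getD "") then m
             else m.insert (((PySem.Dict.mk c).get? "frame").getD "") all).modify
              (((PySem.Dict.mk c).get? "frame").getD "") PySem.Set.empty
              (fun s => PySem.Set.discard s (((PySem.Dict.mk c).get? "family").getD "")) from by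
           simp [pvStepB, hsec]]
      obtain ⟨h1, h2, h3⟩ := step_inv all ff cs m _ _ hkeys hnd hm
      exact ih _ _ _ h1 h2 h3

-- A's second loop over distinct, fresh frames appends the nonempty differences in order
lemma final_items (all : PySem.Set String) (ff : PySem.Dict String (PySem.Set String))
    (cs : List String) (d : PySem.Dict String (List String))
    (hnd : cs.Nodup) (hfresh : ∀ f ∈ cs, d.contains f = false) :
    (cs.foldl (pvStepA2 all ff) d).items
      = d.items ++ (cs.map (fun f => (f, PySem.Set.diff all (ff.getD f PySem.Set.empty)))).filter
          (fun p => !p.2.isEmpty) := by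
  induction cs generalizing d with
  | nil => simp
  | cons f t ih =>
    simp only [List.foldl_cons, List.map_cons, List.filter_cons]
    by_cases hne : (!(PySem.Set.diff all (ff.getD f PySem.Set.empty)).isEmpty) = true
    · rw [show pvStepA2 all ff d f
          = d.insert f (PySem.Set.diff all (ff.getD f PySem.Set.empty)) from by
            simp only [pvStepA2]; rw [if_pos hne],
          ih _ (hnd.of_cons) ?fresh, PySem.Dict.items_insert_of_not_contains _ _ (hfresh f (by simp)),
          hne]
      · simp
      case fresh =>
        intro f' hf'
        rw [PySem.Dict.contains_insert]
        have : (f' == f) = false := beq_false_of_ne (fun h => (List.nodup_cons.mp hnd).1 (h ▸ hf'))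
        rw [this, hfresh f' (by simp [hf'])]
        rfl
    · rw [show pvStepA2 all ff d f = d from by simp only [pvStepA2]; rw [if_neg hne],
          ih _ (hnd.of_cons) (fun f' hf' => hfresh f' (by simp [hf'])), Bool.not_eq_true] at *
      rw [show (!(PySem.Set.diff all (ff.getD f PySem.Set.empty)).isEmpty) = false from by
        simpa using hne]
      simp

-- ===== VERDICT (by name: the statement is the Claim_ definition above) =====
theorem find_missing_families_spec : Claim_equal_find_missing_families := by
  unfold Claim_equal_find_missing_families
  intro classifications hmms_dict _ _
  unfold Spec_find_missing_families find_missing_families find_missing_families_alt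
  show ((List.foldl (pvStepA2 (PySem.Set.ofList ((hmms_dict.map Prod.fst).map pvGetFamily))
            (List.foldl pvStepA (PySem.Dict.empty, PySem.Set.empty) classifications).1)
          PySem.Dict.empty (List.foldl pvStepA (PySem.Dict.empty, PySem.Set.empty) classifications).2).items,
        PySem.Set.ofList ((hmms_dict.map Prod.fst).map pvGetFamily))
      = ((List.foldl (pvStepB (PySem.Set.ofList ((hmms_dict.map Prod.fst).map pvGetFamily)))
            PySem.Dict.empty classifications).items.filter (fun p => !p.2.isEmpty),
         PySem.Set.ofList ((hmms_dict.map Prod.fst).map pvGetFamily))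
  obtain ⟨h1, h2, h3⟩ := loop_inv (PySem.Set.ofList ((hmms_dict.map Prod.fst).map pvGetFamily))
    classifications PySem.Dict.empty PySem.Set.empty PySem.Dict.empty rfl List.nodup_nil (by rfl)
  refine Prod.ext ?_ rfl
  show _ = _
  rw [final_items _ _ _ _ h2 (fun f _ => rfl), h3, List.filter_map]
  rfl
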